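-- pv_equiv track=rewrite | github.com/AdrianSuliga/WDI | Kolokwia/ex_B4_22-23.py | checkT
-- ===== SOURCE A (Python) =====
-- def checkT(T): # funkcja sprawdza czy przy obecnym ułożeniu wież, wszystkie pola są szachowane
--     n = len(T)
--     for i in range(n):
--         for j in range(n):
--             if T[i][j]: # oznacz szachowane pola
--                 k = 1
--                 while -1 < i + k < n:
--                     if T[i + k][j]: break
--                     T[i + k][j] = None
--                     k += 1
--                 k = 1
--                 while -1 < i - k < n:
--                     if T[i - k][j]: break
--                     T[i - k][j] = None
--                     k += 1
--                 k = 1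
--                 while -1 < j + k < n:
--                     if T[i][j + k]: break
--                     T[i][j + k] = None
--                     k += 1
--                 k = 1
--                 while -1 < j - k < n:
--                     if T[i][j - k]: break
--                     T[i][j - k] = None
--                     k += 1
--                 k = 1
--     res = True
--     for i in range(n):
--         for j in range(n): # sprawdź czy wszystkie są szachowane
--             if T[i][j] != None and not T[i][j]: res = False
--     for i in range(n):
--         for j in range(n):
--             if T[i][j]: # odznacz szachowane pola
--                 k = 1
--                 while -1 < i + k < n:
--                     if T[i + k][j]: break
--                     T[i + k][j] = 0
--                     k += 1
--                 k = 1
--                 while -1 < i - k < n: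
--                     if T[i - k][j]: break
--                     T[i - k][j] = 0
--                     k += 1
--                 k = 1
--                 while -1 < j + k < n:
--                     if T[i][j + k]: break
--                     T[i][j + k] = 0
--                     k += 1
--                 k = 1
--                 while -1 < j - k < n:
--                     if T[i][j - k]: break
--                     T[i][j - k] = 0
--                     k += 1
--                 k = 1
--     return res
-- ===== SOURCE B (Python) =====
-- def checkT(T):
--     n = len(T)
--     def attacked(i, j):
--         for di, dj in ((1, 0), (-1, 0), (0, 1), (0, -1)):
--             r, c = i + di, j + dj
--             while 0 <= r < n and 0 <= c < n and not T[r][c]: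
--                 r += di
--                 c += dj
--             if 0 <= r < n and 0 <= c < n and T[r][c]:
--                 return True
--         return False
--     return all(T[i][j] is None or T[i][j] or attacked(i, j)
--                for i in range(n) for j in range(n))
-- ===== Notes on version B (the rewrite author's own statement) =====
-- stated objective: simpler
-- what changed: Replaces A's three in-place mutation passes (mark every rook's rays with None, test every cell, then walk all rays again to un-mark) by a single pure pass that scans the four rays outward from each empty square until the first truthy cell and short-circuits; B never mutates T.
import Mathlib
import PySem

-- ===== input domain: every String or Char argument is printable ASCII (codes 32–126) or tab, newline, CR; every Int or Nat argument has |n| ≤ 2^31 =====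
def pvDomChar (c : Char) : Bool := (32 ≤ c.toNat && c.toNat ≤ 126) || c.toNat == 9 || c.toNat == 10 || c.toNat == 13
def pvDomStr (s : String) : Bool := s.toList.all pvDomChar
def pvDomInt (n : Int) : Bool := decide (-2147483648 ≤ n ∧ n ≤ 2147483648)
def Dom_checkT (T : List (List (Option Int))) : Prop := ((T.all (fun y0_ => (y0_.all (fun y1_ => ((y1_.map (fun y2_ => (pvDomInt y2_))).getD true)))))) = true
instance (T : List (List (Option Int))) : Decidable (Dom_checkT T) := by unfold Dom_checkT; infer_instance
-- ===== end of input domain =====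

-- B re-checks attacked-ness by scanning the four rays from each empty square instead of A's
-- three mutation passes that mark and un-mark rays from every rook; equivalence is about the
-- RETURN value only: Python A mutates its argument in place (and its "restore" pass turns
-- originally-None ray squares into 0), B never mutates T.

-- ===== PORT A =====
-- a cell is "truthy" exactly when Python's `if T[i][j]:` fires (None and 0 are falsy)
def pvTruthy (c : Option Int) : Bool :=
  match c with
  | some v => v != 0
  | none => false

-- read T[i][j]; only evaluated behind guards that ensure 0 ≤ i,j (so toNat is exact here)
def pvGet (T : List (List (Option Int))) (i j : Int) : Option Int :=
  match T[i.toNat]? with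
  | some row => (row[j.toNat]?).getD none
  | none => none

-- write T[i][j] = v (in the pure port the updated grid is threaded instead of mutated)
def pvSet (T : List (List (Option Int))) (i j : Int) (v : Option Int) : List (List (Option Int)) :=
  T.modify i.toNat (fun row => row.set j.toNat v)

-- one of A's `while -1 < … < n:` ray loops, walking from (r,c) in direction (di,dj),
-- overwriting falsy cells with v until a truthy cell (break) or the edge; the moving
-- coordinate leaves [0,n) after at most n steps, so fuel = n is exact
def markLoop (v : Option Int) (n : Int) (di dj : Int)
    (G : List (List (Option Int))) (r c : Int) : Nat → List (List (Option Int))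
  | 0 => G
  | fuel + 1 =>
    if -1 < r ∧ r < n ∧ -1 < c ∧ c < n then
      if pvTruthy (pvGet G r c) then G
      else markLoop v n di dj (pvSet G r c v) (r + di) (c + dj) fuel
    else G

-- the four consecutive while-loops of A's body (+i, -i, +j, -j), in A's order
def markRays (v : Option Int) (n : Int) (i j : Int)
    (G : List (List (Option Int))) : List (List (Option Int)) :=
  let G1 := markLoop v n 1 0 G (i + 1) j n.toNat
  let G2 := markLoop v n (-1) 0 G1 (i - 1) j n.toNat
  let G3 := markLoop v n 0 1 G2 i (j + 1) n.toNat
  markLoop v n 0 (-1) G3 i (j - 1) n.toNat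

def checkT (T : List (List (Option Int))) : Bool :=
  let n : Int := T.length
  -- first double loop: mark every ray square with None
  let G1 := (List.range T.length).foldl (fun G (i : Nat) =>
    (List.range T.length).foldl (fun G (j : Nat) =>
      if pvTruthy (pvGet G i j) then markRays none n i j G else G) G) T
  -- second double loop: `if T[i][j] != None and not T[i][j]: res = False`
  let res := (List.range T.length).foldl (fun r (i : Nat) =>
    (List.range T.length).foldl (fun r (j : Nat) =>
      if pvGet G1 i j ≠ none ∧ pvTruthy (pvGet G1 i j) = false then false else r) r) true
  -- third double loop: un-mark (in Python this only mutates the argument back; the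
  -- return value is res computed above, so the result is threaded into nothing)
  let _G2 := (List.range T.length).foldl (fun G (i : Nat) =>
    (List.range T.length).foldl (fun G (j : Nat) =>
      if pvTruthy (pvGet G i j) then markRays (some 0) n i j G else G) G) G1
  res

-- ===== PORT B =====
-- B's inner while: advance from (r,c) in direction (di,dj) while in bounds and falsy;
-- report whether the walk stopped on a truthy cell (a rook)
def scanDir (T : List (List (Option Int))) (n : Int) (di dj : Int)
    (r c : Int) : Nat → Bool
  | 0 => false
  | fuel + 1 =>
    if 0 ≤ r ∧ r < n ∧ 0 ≤ c ∧ c < n then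
      if pvTruthy (pvGet T r c) then true
      else scanDir T n di dj (r + di) (c + dj) fuel
    else false

def attacked (T : List (List (Option Int))) (n : Int) (i j : Int) : Bool :=
  [((1:Int), (0:Int)), (-1, 0), (0, 1), (0, -1)].any fun d =>
    scanDir T n d.1 d.2 (i + d.1) (j + d.2) n.toNat

def checkT_alt (T : List (List (Option Int))) : Bool :=
  let n : Int := T.length
  (List.range T.length).all fun (i : Nat) =>
    (List.range T.length).all fun (j : Nat) =>
      pvGet T i j == none || pvTruthy (pvGet T i j) || attacked T n i j

-- ===== PRECONDITION & SPEC =====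
-- Python A indexes T[i][j] for all i, j < len(T): any row shorter than len(T) raises
-- IndexError, so exactly those boards are excluded (rows may be longer; extra cells unread).
def Pre_checkT (T : List (List (Option Int))) : Prop :=
  ∀ row ∈ T, T.length ≤ row.length

instance (T : List (List (Option Int))) : Decidable (Pre_checkT T) := by
  unfold Pre_checkT; infer_instance

def pvWitness_checkT : List (List (Option Int)) :=
  [[some 1, some 0], [some 0, none]]

def Spec_checkT (T : List (List (Option Int))) (out : Bool) : Prop := out = checkT_alt T
instance (T : List (List (Option Int))) (out : Bool) : Decidable (Spec_checkT T out) := by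
  unfold Spec_checkT; infer_instance

-- ===== CLAIM (what is proved, stated in full; the proofs are below) =====
def Claim_equal_checkT : Prop := ∀ (T : List (List (Option Int))), Dom_checkT T → Pre_checkT T → Spec_checkT T (checkT T)

-- ===== LEMMAS AND PROOFS =====

-- in-bounds predicate for a board of side n
def Inb (n r c : Int) : Prop := 0 ≤ r ∧ r < n ∧ 0 ≤ c ∧ c < n

-- "from (i,j), walking in direction (di,dj), the first truthy cell exists at distance k,
-- through in-bounds falsy cells" — the common spec both programs are reduced to
def AttD (T : List (List (Option Int))) (n i j di dj : Int) : Prop :=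
  ∃ k : Int, 1 ≤ k ∧ Inb n (i + di * k) (j + dj * k) ∧
    pvTruthy (pvGet T (i + di * k) (j + dj * k)) = true ∧
    ∀ m : Int, 1 ≤ m → m < k →
      Inb n (i + di * m) (j + dj * m) ∧ pvTruthy (pvGet T (i + di * m) (j + dj * m)) = false

def Att (T : List (List (Option Int))) (n i j : Int) : Prop :=
  AttD T n i j 1 0 ∨ AttD T n i j (-1) 0 ∨ AttD T n i j 0 1 ∨ AttD T n i j 0 (-1)

-- invariant of A's marking pass: each cell is untouched, or was an attacked empty cell marked None
def CInv (T G : List (List (Option Int))) : Prop :=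
  ∀ i j : Nat, pvGet G i j = pvGet T i j ∨
    (pvGet G i j = none ∧ pvGet T i j = some 0 ∧ Att T T.length i j)

-- the marking pass never changes which cells are truthy
def PEq (T G : List (List (Option Int))) : Prop :=
  ∀ i j : Nat, pvTruthy (pvGet G i j) = pvTruthy (pvGet T i j)

def ShapeEq (G T : List (List (Option Int))) : Prop :=
  ∀ i : Nat, (G[i]?).map List.length = (T[i]?).map List.length

lemma pvGet_toNat (G : List (List (Option Int))) (r c : Int) :
    pvGet G r c = pvGet G (r.toNat : Int) (c.toNat : Int) := by
  simp only [pvGet, Int.toNat_natCast]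

lemma pvGet_pvSet_cases (G : List (List (Option Int))) (a b : Int) (v : Option Int) (i j : Int) :
    pvGet (pvSet G a b v) i j = pvGet G i j ∨
      (pvGet (pvSet G a b v) i j = v ∧ i.toNat = a.toNat ∧ j.toNat = b.toNat) := by
  simp only [pvGet, pvSet, List.getElem?_modify]
  cases hG : G[i.toNat]? with
  | none =>
    by_cases h : a.toNat = i.toNat <;> simp [h]
  | some row =>
    by_cases h : a.toNat = i.toNat
    · simp only [if_pos h]
      by_cases hb : b.toNat = j.toNat
      · by_cases hlen : b.toNat < row.length
        · right
          simp [hb, hb ▸ hlen, h.symm]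
        · left
          simp [hb, hb ▸ hlen]
      · simp [hb]
    · simp [h]

lemma pvGet_pvSet_self (G : List (List (Option Int))) (a b : Int) (v : Option Int)
    (row : List (Option Int)) (hrow : G[a.toNat]? = some row) (hb : b.toNat < row.length) :
    pvGet (pvSet G a b v) a b = v := by
  simp [pvGet, pvSet, hrow, hb]

lemma shape_pvSet (G T : List (List (Option Int))) (a b : Int) (v : Option Int)
    (h : ShapeEq G T) : ShapeEq (pvSet G a b v) T := by
  intro i
  rw [← h i]
  simp only [pvSet, List.getElem?_modify]
  cases hG : G[i]? with
  | none => simp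
  | some row => by_cases hai : a.toNat = i <;> simp [hai, List.length_set]

lemma cinv_peq (T G : List (List (Option Int))) (h : CInv T G) : PEq T G := by
  intro i j
  rcases h i j with h1 | ⟨h1, h2, _⟩
  · rw [h1]
  · rw [h1, h2]; rfl

-- a cell that is in bounds can actually be written, given the shape and Pre_
lemma shape_cell (T G : List (List (Option Int))) (hs : ShapeEq G T) (hpre : Pre_checkT T)
    (r c : Int) (h : Inb T.length r c) :
    ∃ row, G[r.toNat]? = some row ∧ c.toNat < row.length := by
  obtain ⟨hr0, hrn, hc0, hcn⟩ := h
  have hrlt : r.toNat < T.length := by omega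
  have hT : T[r.toNat]? = some (T[r.toNat]'hrlt) := List.getElem?_eq_getElem hrlt
  have := hs r.toNat
  rw [hT] at this
  cases hG : G[r.toNat]? with
  | none => rw [hG] at this; simp at this
  | some row =>
    rw [hG] at this
    simp only [Option.map_some, Option.some.injEq] at this
    refine ⟨row, rfl, ?_⟩
    have hmem : T[r.toNat]'hrlt ∈ T := List.getElem_mem _
    have := hpre _ hmem
    omega

-- ---- scanDir (port B) ⇔ AttD ----

lemma scanDir_iff (T : List (List (Option Int))) (n i j di dj : Int) (fuel : Nat) (k0 : Int) :
      scanDir T n di dj (i + di * k0) (j + dj * k0) fuel = true ↔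
      ∃ k : Int, k0 ≤ k ∧ k < k0 + fuel ∧ Inb n (i + di * k) (j + dj * k) ∧
        pvTruthy (pvGet T (i + di * k) (j + dj * k)) = true ∧
        ∀ m : Int, k0 ≤ m → m < k →
          Inb n (i + di * m) (j + dj * m) ∧ pvTruthy (pvGet T (i + di * m) (j + dj * m)) = false := by
  induction fuel generalizing k0 with
  | zero =>
    simp only [scanDir, Bool.false_eq_true, false_iff]
    rintro ⟨k, hk1, hk2, -⟩
    simp only [Nat.cast_zero] at hk2
    omega
  | succ fuel ih =>
    simp only [scanDir]
    split_ifs with hinb htr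
    · constructor
      · intro _
        exact ⟨k0, le_refl _, by push_cast; omega, hinb, htr, fun m h1 h2 => absurd h1 (by omega)⟩
      · intro _; rfl
    · have e1 : i + di * k0 + di = i + di * (k0 + 1) := by ring
      have e2 : j + dj * k0 + dj = j + dj * (k0 + 1) := by ring
      rw [e1, e2, ih (k0 + 1)]
      constructor
      · rintro ⟨k, hk1, hk2, hk3, hk4, hk5⟩
        refine ⟨k, by omega, by push_cast at hk2 ⊢; omega, hk3, hk4, fun m hm1 hm2 => ?_⟩
        rcases eq_or_lt_of_le hm1 with rfl | hlt
        · exact ⟨hinb, Bool.eq_false_iff.mpr htr⟩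
        · exact hk5 m (by omega) hm2
      · rintro ⟨k, hk1, hk2, hk3, hk4, hk5⟩
        have hne : k ≠ k0 := by rintro rfl; rw [hk4] at htr; exact htr rfl
        refine ⟨k, by omega, by push_cast at hk2 ⊢; omega, hk3, hk4, fun m hm1 hm2 => hk5 m (by omega) hm2⟩
    · simp only [false_iff]
      rintro ⟨k, hk1, hk2, hk3, hk4, hk5⟩
      rcases eq_or_lt_of_le hk1 with rfl | hlt
      · exact hinb hk3
      · exact hinb (hk5 k0 (le_refl _) hlt).1

lemma scanDir_one_iff (T : List (List (Option Int))) (n i j di dj : Int)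
    (hb : ∀ k : Int, 1 ≤ k → Inb n (i + di * k) (j + dj * k) → k < 1 + (n.toNat : Int)) :
    scanDir T n di dj (i + di) (j + dj) n.toNat = true ↔ AttD T n i j di dj := by
  have e1 : i + di = i + di * 1 := by ring
  have e2 : j + dj = j + dj * 1 := by ring
  rw [e1, e2, scanDir_iff T n i j di dj n.toNat 1]
  constructor
  · rintro ⟨k, hk1, hk2, hk3, hk4, hk5⟩
    exact ⟨k, hk1, hk3, hk4, hk5⟩
  · rintro ⟨k, hk1, hk3, hk4, hk5⟩
    exact ⟨k, hk1, by have := hb k hk1 hk3; omega, hk3, hk4, hk5⟩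

lemma attacked_iff (T : List (List (Option Int))) (i j : Int)
    (hi : 0 ≤ i) (hi' : i < (T.length : Int)) (hj : 0 ≤ j) (hj' : j < (T.length : Int)) :
    attacked T T.length i j = true ↔ Att T T.length i j := by
  have A1 := scanDir_one_iff T (T.length : Int) i j 1 0
    (by rintro k hk ⟨u1, u2, u3, u4⟩; omega)
  have A2 := scanDir_one_iff T (T.length : Int) i j (-1) 0
    (by rintro k hk ⟨u1, u2, u3, u4⟩; omega)
  have A3 := scanDir_one_iff T (T.length : Int) i j 0 1
    (by rintro k hk ⟨u1, u2, u3, u4⟩; omega)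
  have A4 := scanDir_one_iff T (T.length : Int) i j 0 (-1)
    (by rintro k hk ⟨u1, u2, u3, u4⟩; omega)
  unfold attacked Att
  simp only [List.any_cons, List.any_nil, Bool.or_false, Bool.or_eq_true]
  exact or_congr A1 (or_congr A2 (or_congr A3 A4))

-- ---- markLoop (port A) lemmas ----

lemma markLoop_none_mono (n di dj : Int) (x y : Int) :
    ∀ (fuel : Nat) (G : List (List (Option Int))) (r c : Int),
      pvGet G x y = none → pvGet (markLoop none n di dj G r c fuel) x y = none := by
  intro fuel
  induction fuel with
  | zero => intro G r c h; simpa [markLoop] using h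
  | succ fuel ih =>
    intro G r c h
    simp only [markLoop]
    split_ifs with h1 h2
    · exact h
    · apply ih
      rcases pvGet_pvSet_cases G r c none x y with he | ⟨he, -⟩ <;> rw [he]
      exact h
    · exact h

lemma markLoop_shape (T : List (List (Option Int))) (n di dj : Int) :
    ∀ (fuel : Nat) (G : List (List (Option Int))) (r c : Int),
      ShapeEq G T → ShapeEq (markLoop none n di dj G r c fuel) T := by
  intro fuel
  induction fuel with
  | zero => intro G r c h; simpa [markLoop] using h
  | succ fuel ih =>
    intro G r c h
    simp only [markLoop]
    split_ifs with h1 h2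
    · exact h
    · exact ih _ _ _ (shape_pvSet G T r c none h)
    · exact h

lemma markLoop_peq (T : List (List (Option Int))) (n di dj : Int) :
    ∀ (fuel : Nat) (G : List (List (Option Int))) (r c : Int),
      PEq T G → PEq T (markLoop none n di dj G r c fuel) := by
  intro fuel
  induction fuel with
  | zero => intro G r c h; simpa [markLoop] using h
  | succ fuel ih =>
    intro G r c h
    simp only [markLoop]
    split_ifs with h1 h2
    · exact h
    · apply ih
      intro x y
      rcases pvGet_pvSet_cases G r c none x y with he | ⟨he, hx, hy⟩
      · rw [he]; exact h x y
      · rw [he]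
        have hxx : (x : Int) = (r.toNat : Int) := by omega
        have hyy : (y : Int) = (c.toNat : Int) := by omega
        have : pvGet G (x : Int) (y : Int) = pvGet G r c := by
          rw [hxx, hyy, ← pvGet_toNat]
        rw [← h x y, this]
        simp only [pvTruthy]
        exact (Bool.eq_false_iff.mpr h2).symm
    · exact h

lemma markLoop_sound (T : List (List (Option Int))) (di dj a b : Int)
    (hd : (di, dj) = (1, 0) ∨ (di, dj) = (-1, 0) ∨ (di, dj) = (0, 1) ∨ (di, dj) = (0, -1))
    (hrook : pvTruthy (pvGet T a b) = true) (hab : Inb T.length a b) :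
    ∀ (fuel : Nat) (k0 : Int) (G : List (List (Option Int))), 1 ≤ k0 → CInv T G →
      (∀ m : Int, 1 ≤ m → m < k0 →
        Inb T.length (a + di * m) (b + dj * m) ∧
          pvTruthy (pvGet T (a + di * m) (b + dj * m)) = false) →
      CInv T (markLoop none T.length di dj G (a + di * k0) (b + dj * k0) fuel) := by
  intro fuel
  induction fuel with
  | zero => intro k0 G _ hG _; simpa [markLoop] using hG
  | succ fuel ih =>
    intro k0 G hk0 hG hpre
    simp only [markLoop]
    split_ifs with h1 h2
    · exact hG
    · -- the walked cell is falsy: it is set to None; justify the invariant for the new grid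
      have hr0 : 0 ≤ a + di * k0 := by rcases h1 with ⟨u, -, -, -⟩; omega
      have hc0 : 0 ≤ b + dj * k0 := by rcases h1 with ⟨-, -, u, -⟩; omega
      have hTfalsy : pvTruthy (pvGet T (a + di * k0) (b + dj * k0)) = false := by
        rw [pvGet_toNat T, ← cinv_peq T G hG (a + di * k0).toNat (b + dj * k0).toNat,
          ← pvGet_toNat G]
        exact Bool.eq_false_iff.mpr h2
      have hinb : Inb (T.length) (a + di * k0) (b + dj * k0) := by
        rcases h1 with ⟨u1, u2, u3, u4⟩; exact ⟨by omega, u2, by omega, u4⟩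
      have e1 : a + di * k0 + di = a + di * (k0 + 1) := by ring
      have e2 : b + dj * k0 + dj = b + dj * (k0 + 1) := by ring
      rw [e1, e2]
      apply ih (k0 + 1) _ (by omega)
      · -- CInv is preserved by writing None into the falsy cell at distance k0
        intro x y
        rcases pvGet_pvSet_cases G (a + di * k0) (b + dj * k0) none x y with he | ⟨he, hx, hy⟩
        · rcases hG x y with h' | h'
          · exact Or.inl (he.trans h')
          · exact Or.inr ⟨he.trans h'.1, h'.2⟩
        · -- the cell written is exactly (a+di*k0, b+dj*k0)
          have hxx : (x : Int) = a + di * k0 := by omega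
          have hyy : (y : Int) = b + dj * k0 := by omega
          rw [hxx, hyy] at he ⊢
          cases hTv : pvGet T (a + di * k0) (b + dj * k0) with
          | none => exact Or.inl (he.trans rfl)
          | some v =>
            have hv0 : v = 0 := by
              rw [hTv] at hTfalsy; simpa [pvTruthy] using hTfalsy
            subst hv0
            refine Or.inr ⟨he, rfl, ?_⟩
            -- the cell is attacked: the rook sits at distance k0 in direction (-di,-dj)
            have hAttD : AttD T T.length (a + di * k0) (b + dj * k0) (-di) (-dj) := by
              refine ⟨k0, hk0, ?_, ?_, ?_⟩
              · have e : a + di * k0 + -di * k0 = a := by ring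
                have e' : b + dj * k0 + -dj * k0 = b := by ring
                rw [e, e']; exact hab
              · have e : a + di * k0 + -di * k0 = a := by ring
                have e' : b + dj * k0 + -dj * k0 = b := by ring
                rw [e, e']; exact hrook
              · intro m hm1 hm2
                have e : a + di * k0 + -di * m = a + di * (k0 - m) := by ring
                have e' : b + dj * k0 + -dj * m = b + dj * (k0 - m) := by ring
                rw [e, e']
                exact hpre (k0 - m) (by omega) (by omega)
            rcases hd with h | h | h | h <;> rw [Prod.mk.injEq] at h <;>
              obtain ⟨rfl, rfl⟩ := h <;> unfold Att <;> norm_num at hAttD ⊢ <;> tauto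
      · -- the interior facts extend to k0 + 1
        intro m hm1 hm2
        rcases eq_or_lt_of_le (by omega : m ≤ k0) with rfl | hlt
        · exact ⟨hinb, hTfalsy⟩
        · exact hpre m hm1 (by omega)
    · exact hG

lemma markLoop_complete (T : List (List (Option Int))) (hpre : Pre_checkT T) (di dj a b M : Int) :
    ∀ (fuel : Nat) (k0 : Int) (G : List (List (Option Int))),
      PEq T G → ShapeEq G T → 1 ≤ k0 → k0 ≤ M → M < k0 + fuel →
      (∀ l : Int, k0 ≤ l → l ≤ M →
        Inb T.length (a + di * l) (b + dj * l) ∧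
          pvTruthy (pvGet T (a + di * l) (b + dj * l)) = false) →
      pvGet (markLoop none T.length di dj G (a + di * k0) (b + dj * k0) fuel)
        (a + di * M) (b + dj * M) = none := by
  intro fuel
  induction fuel with
  | zero => intro k0 G _ _ _ _ h; omega
  | succ fuel ih =>
    intro k0 G hpeq hs hk0 hk0M hMf hl
    have hcur := hl k0 (le_refl _) hk0M
    simp only [markLoop]
    rw [if_pos (by rcases hcur.1 with ⟨u1, u2, u3, u4⟩; exact ⟨by omega, u2, by omega, u4⟩)]
    have hr0 : 0 ≤ a + di * k0 := hcur.1.1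
    have hc0 : 0 ≤ b + dj * k0 := hcur.1.2.2.1
    have hGfalsy : pvTruthy (pvGet G (a + di * k0) (b + dj * k0)) = false := by
      rw [pvGet_toNat G, hpeq (a + di * k0).toNat (b + dj * k0).toNat, ← pvGet_toNat T]
      exact hcur.2
    rw [if_neg (by rw [hGfalsy]; exact Bool.false_ne_true)]
    obtain ⟨row, hrow, hblen⟩ := shape_cell T G hs hpre _ _ hcur.1
    rcases eq_or_lt_of_le hk0M with rfl | hlt
    · -- the target cell itself is written now; later steps keep it None
      apply markLoop_none_mono
      exact pvGet_pvSet_self G _ _ none row hrow hblen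
    · have e1 : a + di * k0 + di = a + di * (k0 + 1) := by ring
      have e2 : b + dj * k0 + dj = b + dj * (k0 + 1) := by ring
      rw [e1, e2]
      refine ih (k0 + 1) _ ?_ ?_ (by omega) (by omega) (by omega) ?_
      · -- writing None into a falsy cell preserves the truthy pattern
        intro x y
        rcases pvGet_pvSet_cases G (a + di * k0) (b + dj * k0) none x y with he | ⟨he, hx, hy⟩
        · rw [he]; exact hpeq x y
        · rw [he]
          have hxx : (x : Int) = a + di * k0 := by omega
          have hyy : (y : Int) = b + dj * k0 := by omega
          rw [hxx, hyy, hcur.2]; rfl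
      · exact shape_pvSet G T _ _ none hs
      · intro l h1 h2; exact hl l (by omega) h2

-- ---- markRays lemmas ----

-- positional wrappers for the two markLoop lemmas (k0 = 1, start cell one step from the rook)
lemma markLoop_sound1 (T G : List (List (Option Int))) (di dj a b r c : Int)
    (hd : (di, dj) = (1, 0) ∨ (di, dj) = (-1, 0) ∨ (di, dj) = (0, 1) ∨ (di, dj) = (0, -1))
    (hrook : pvTruthy (pvGet T a b) = true) (hab : Inb T.length a b)
    (hr : r = a + di * 1) (hc : c = b + dj * 1) (h : CInv T G) (fuel : Nat) :
    CInv T (markLoop none T.length di dj G r c fuel) := by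
  rw [hr, hc]
  exact markLoop_sound T di dj a b hd hrook hab fuel 1 G (le_refl _) h
    (by intro m h1 h2; omega)

lemma markLoop_complete1 (T G : List (List (Option Int))) (hpre : Pre_checkT T)
    (di dj a b M r c : Int)
    (hpeq : PEq T G) (hs : ShapeEq G T) (hM : 1 ≤ M) (hMf : M < 1 + ((T.length : Int)).toNat)
    (hr : r = a + di * 1) (hc : c = b + dj * 1)
    (hl : ∀ l : Int, 1 ≤ l → l ≤ M →
      Inb T.length (a + di * l) (b + dj * l) ∧
        pvTruthy (pvGet T (a + di * l) (b + dj * l)) = false) :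
    pvGet (markLoop none T.length di dj G r c ((T.length : Int)).toNat)
      (a + di * M) (b + dj * M) = none := by
  rw [hr, hc]
  exact markLoop_complete T hpre di dj a b M _ 1 G hpeq hs (le_refl _) hM (by omega) hl

lemma markRays_none_mono (n a b x y : Int) (G : List (List (Option Int)))
    (h : pvGet G x y = none) : pvGet (markRays none n a b G) x y = none := by
  unfold markRays
  exact markLoop_none_mono _ _ _ _ _ _ _ _ _
    (markLoop_none_mono _ _ _ _ _ _ _ _ _
      (markLoop_none_mono _ _ _ _ _ _ _ _ _
        (markLoop_none_mono _ _ _ _ _ _ _ _ _ h)))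

lemma markRays_shape (T G : List (List (Option Int))) (a b : Int)
    (h : ShapeEq G T) : ShapeEq (markRays none T.length a b G) T := by
  unfold markRays
  exact markLoop_shape T _ _ _ _ _ _ _
    (markLoop_shape T _ _ _ _ _ _ _
      (markLoop_shape T _ _ _ _ _ _ _
        (markLoop_shape T _ _ _ _ _ _ _ h)))

lemma markRays_sound (T G : List (List (Option Int))) (a b : Int)
    (hrook : pvTruthy (pvGet T a b) = true) (hab : Inb T.length a b)
    (h : CInv T G) : CInv T (markRays none T.length a b G) := by
  unfold markRays
  apply markLoop_sound1 T _ 0 (-1) a b _ _ (by norm_num) hrook hab (by ring) (by ring)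
  apply markLoop_sound1 T _ 0 1 a b _ _ (by norm_num) hrook hab (by ring) (by ring)
  apply markLoop_sound1 T _ (-1) 0 a b _ _ (by norm_num) hrook hab (by ring) (by ring)
  exact markLoop_sound1 T _ 1 0 a b _ _ (by norm_num) hrook hab (by ring) (by ring) h _

lemma markRays_complete (T G : List (List (Option Int))) (hpre : Pre_checkT T)
    (a b di dj M : Int)
    (hd : (di, dj) = (1, 0) ∨ (di, dj) = (-1, 0) ∨ (di, dj) = (0, 1) ∨ (di, dj) = (0, -1))
    (hG : CInv T G) (hs : ShapeEq G T) (hM : 1 ≤ M)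
    (hl : ∀ l : Int, 1 ≤ l → l ≤ M →
      Inb T.length (a + di * l) (b + dj * l) ∧
        pvTruthy (pvGet T (a + di * l) (b + dj * l)) = false) :
    pvGet (markRays none T.length a b G) (a + di * M) (b + dj * M) = none := by
  have hpeq := cinv_peq T G hG
  have h1 := (hl M hM (le_refl _)).1
  have h2 := (hl 1 (le_refl _) hM).1
  unfold markRays
  rcases hd with h | h | h | h <;> rw [Prod.mk.injEq] at h <;> obtain ⟨rfl, rfl⟩ := h
  · -- ray (+1,0): the first loop writes the target cell; the outer three keep it None
    apply markLoop_none_mono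
    apply markLoop_none_mono
    apply markLoop_none_mono
    exact markLoop_complete1 T G hpre 1 0 a b M (a + 1) b hpeq hs hM
      (by obtain ⟨u1, u2, u3, u4⟩ := h1; obtain ⟨v1, v2, v3, v4⟩ := h2; omega)
      (by ring) (by ring) hl
  · -- ray (-1,0): second loop writes it
    apply markLoop_none_mono
    apply markLoop_none_mono
    exact markLoop_complete1 T _ hpre (-1) 0 a b M (a - 1) b
      (markLoop_peq T _ _ _ _ _ _ _ hpeq) (markLoop_shape T _ _ _ _ _ _ _ hs) hM
      (by obtain ⟨u1, u2, u3, u4⟩ := h1; obtain ⟨v1, v2, v3, v4⟩ := h2; omega)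
      (by ring) (by ring) hl
  · -- ray (0,+1): third loop writes it
    apply markLoop_none_mono
    exact markLoop_complete1 T _ hpre 0 1 a b M a (b + 1)
      (markLoop_peq T _ _ _ _ _ _ _ (markLoop_peq T _ _ _ _ _ _ _ hpeq))
      (markLoop_shape T _ _ _ _ _ _ _ (markLoop_shape T _ _ _ _ _ _ _ hs)) hM
      (by obtain ⟨u1, u2, u3, u4⟩ := h1; obtain ⟨v1, v2, v3, v4⟩ := h2; omega)
      (by ring) (by ring) hl
  · -- ray (0,-1): outermost loop writes it
    exact markLoop_complete1 T _ hpre 0 (-1) a b M a (b - 1)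
      (markLoop_peq T _ _ _ _ _ _ _ (markLoop_peq T _ _ _ _ _ _ _
        (markLoop_peq T _ _ _ _ _ _ _ hpeq)))
      (markLoop_shape T _ _ _ _ _ _ _ (markLoop_shape T _ _ _ _ _ _ _
        (markLoop_shape T _ _ _ _ _ _ _ hs))) hM
      (by obtain ⟨u1, u2, u3, u4⟩ := h1; obtain ⟨v1, v2, v3, v4⟩ := h2; omega)
      (by ring) (by ring) hl

-- ---- the outer marking double-loop, flattened over cell pairs ----

def stepFn (T : List (List (Option Int))) (G : List (List (Option Int))) (p : Nat × Nat) :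
    List (List (Option Int)) :=
  if pvTruthy (pvGet G p.1 p.2) then markRays none T.length p.1 p.2 G else G

lemma foldl_flatMap {α β γ : Type} (L : List β) (M : List γ) (f : α → β → γ → α) (init : α) :
    L.foldl (fun s i => M.foldl (fun s j => f s i j) s) init
      = (L.flatMap fun i => M.map fun j => (i, j)).foldl (fun s p => f s p.1 p.2) init := by
  induction L generalizing init with
  | nil => rfl
  | cons a L ih =>
    simp only [List.foldl_cons, List.flatMap_cons, List.foldl_append, List.foldl_map, ih]

lemma latch {β : Type} (q : β → Prop) [DecidablePred q] :
    ∀ (l : List β) (b : Bool),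
      l.foldl (fun r p => if q p then false else r) b = (b && l.all fun p => !decide (q p)) := by
  intro l
  induction l with
  | nil => intro b; simp
  | cons a l ih =>
    intro b
    simp only [List.foldl_cons, List.all_cons, ih]
    by_cases h : q a <;> simp [h]

lemma fold_sound (T : List (List (Option Int))) :
    ∀ (ps : List (Nat × Nat)) (G : List (List (Option Int))),
      (∀ p ∈ ps, p.1 < T.length ∧ p.2 < T.length) → CInv T G → ShapeEq G T →
      CInv T (ps.foldl (stepFn T) G) ∧ ShapeEq (ps.foldl (stepFn T) G) T := by
  intro ps
  induction ps with
  | nil => intro G _ h1 h2; exact ⟨h1, h2⟩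
  | cons p ps ih =>
    intro G hps h1 h2
    apply ih _ (fun q hq => hps q (List.mem_cons_of_mem _ hq))
    · unfold stepFn
      split_ifs with ht
      · apply markRays_sound T G p.1 p.2 _ _ h1
        · rw [pvGet_toNat T, Int.toNat_natCast, Int.toNat_natCast, ← cinv_peq T G h1 p.1 p.2]
          exact ht
        · obtain ⟨u1, u2⟩ := hps p List.mem_cons_self
          exact ⟨by omega, by exact_mod_cast u1, by omega, by exact_mod_cast u2⟩
      · exact h1
    · unfold stepFn
      split_ifs with ht
      · exact markRays_shape T G _ _ h2
      · exact h2


lemma fold_mono (T : List (List (Option Int))) (x y : Int) :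
    ∀ (ps : List (Nat × Nat)) (G : List (List (Option Int))),
      pvGet G x y = none → pvGet (ps.foldl (stepFn T) G) x y = none := by
  intro ps
  induction ps with
  | nil => intro G h; exact h
  | cons p ps ih =>
    intro G h
    apply ih
    unfold stepFn
    split_ifs with ht
    · exact markRays_none_mono _ _ _ _ _ _ h
    · exact h

def pairs (n : Nat) : List (Nat × Nat) :=
  (List.range n).flatMap fun i => (List.range n).map fun j => (i, j)

lemma mem_pairs (n : Nat) (p : Nat × Nat) : p ∈ pairs n ↔ p.1 < n ∧ p.2 < n := by
  cases p with
  | mk x y => simp [pairs, List.mem_flatMap, List.mem_map, List.mem_range]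

lemma fold_complete (T : List (List (Option Int))) (hpre : Pre_checkT T) (x y : Nat)
    (hx : x < T.length) (hy : y < T.length) (hv : pvGet T x y = some 0)
    (hatt : Att T T.length x y) :
    pvGet ((pairs T.length).foldl (stepFn T) T) x y = none := by
  obtain ⟨d1, d2, hd, hA⟩ : ∃ d1 d2 : Int,
      ((d1, d2) = ((1 : Int), (0 : Int)) ∨ (d1, d2) = (-1, 0) ∨ (d1, d2) = (0, 1) ∨
        (d1, d2) = (0, -1)) ∧ AttD T T.length x y d1 d2 := by
    rcases hatt with h | h | h | h
    exacts [⟨1, 0, Or.inl rfl, h⟩, ⟨-1, 0, Or.inr (Or.inl rfl), h⟩,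
      ⟨0, 1, Or.inr (Or.inr (Or.inl rfl)), h⟩, ⟨0, -1, Or.inr (Or.inr (Or.inr rfl)), h⟩]
  obtain ⟨k, hk1, hkInb, hkT, hki⟩ := hA
  obtain ⟨hb1, hb2, hb3, hb4⟩ := hkInb
  have hmem : (((x : Int) + d1 * k).toNat, ((y : Int) + d2 * k).toNat) ∈ pairs T.length :=
    (mem_pairs _ _).2 ⟨by omega, by omega⟩
  obtain ⟨l1, l2, hsplit⟩ := List.append_of_mem hmem
  rw [hsplit, List.foldl_append, List.foldl_cons]
  apply fold_mono
  have hl1 : ∀ p ∈ l1, p.1 < T.length ∧ p.2 < T.length := by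
    intro p hp
    have hpm : p ∈ pairs T.length := by rw [hsplit]; exact List.mem_append_left _ hp
    exact (mem_pairs _ _).1 hpm
  obtain ⟨hC, hS⟩ := fold_sound T l1 T hl1 (fun i j => Or.inl rfl) (fun i => rfl)
  have hcast1 : ((((x : Int) + d1 * k).toNat : Int)) = (x : Int) + d1 * k :=
    Int.toNat_of_nonneg (by omega)
  have hcast2 : ((((y : Int) + d2 * k).toNat : Int)) = (y : Int) + d2 * k :=
    Int.toNat_of_nonneg (by omega)
  have hguardT : pvTruthy (pvGet (l1.foldl (stepFn T) T)
      (((x : Int) + d1 * k).toNat : Int) (((y : Int) + d2 * k).toNat : Int)) = true := by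
    rw [cinv_peq T _ hC, hcast1, hcast2]; exact hkT
  unfold stepFn
  dsimp only
  split_ifs with hg
  case neg => exact absurd hguardT hg
  have hdneg : ((-d1, -d2) = ((1 : Int), (0 : Int)) ∨ (-d1, -d2) = (-1, 0) ∨
      (-d1, -d2) = (0, 1) ∨ (-d1, -d2) = (0, -1)) := by
    rcases hd with h | h | h | h <;> rw [Prod.mk.injEq] at h <;> obtain ⟨rfl, rfl⟩ := h <;>
      norm_num
  have hl : ∀ l : Int, 1 ≤ l → l ≤ k →
      Inb T.length (((x : Int) + d1 * k) + -d1 * l) (((y : Int) + d2 * k) + -d2 * l) ∧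
        pvTruthy (pvGet T (((x : Int) + d1 * k) + -d1 * l)
          (((y : Int) + d2 * k) + -d2 * l)) = false := by
    intro l u1 u2
    have e1 : ((x : Int) + d1 * k) + -d1 * l = (x : Int) + d1 * (k - l) := by ring
    have e2 : ((y : Int) + d2 * k) + -d2 * l = (y : Int) + d2 * (k - l) := by ring
    rw [e1, e2]
    rcases eq_or_lt_of_le u2 with rfl | hlt
    · simp only [sub_self, mul_zero, add_zero]
      refine ⟨⟨by omega, by omega, by omega, by omega⟩, ?_⟩
      rw [hv]; rfl
    · exact hki (k - l) (by omega) (by omega)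
  have hres := markRays_complete T (l1.foldl (stepFn T) T) hpre
    ((x : Int) + d1 * k) ((y : Int) + d2 * k) (-d1) (-d2) k hdneg hC hS hk1 hl
  have e1 : ((x : Int) + d1 * k) + -d1 * k = (x : Int) := by ring
  have e2 : ((y : Int) + d2 * k) + -d2 * k = (y : Int) := by ring
  rw [e1, e2, ← hcast1, ← hcast2] at hres
  exact hres

-- final characterisation of the marked board
lemma char_G1 (T : List (List (Option Int))) (hpre : Pre_checkT T) (x y : Nat)
    (hx : x < T.length) (hy : y < T.length) :
    (pvGet ((pairs T.length).foldl (stepFn T) T) x y = some 0 ↔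
      pvGet T x y = some 0 ∧ ¬ Att T T.length x y) := by
  have hps : ∀ p ∈ pairs T.length, p.1 < T.length ∧ p.2 < T.length :=
    fun p hp => (mem_pairs _ _).1 hp
  obtain ⟨hC, -⟩ := fold_sound T (pairs T.length) T hps (fun i j => Or.inl rfl) (fun i => rfl)
  constructor
  · intro h
    rcases hC x y with h1 | ⟨h1, -, -⟩
    · refine ⟨h1 ▸ h, fun hatt => ?_⟩
      rw [fold_complete T hpre x y hx hy (h1 ▸ h) hatt] at h
      simp at h
    · rw [h1] at h; simp at h
  · rintro ⟨hv, hna⟩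
    rcases hC x y with h1 | ⟨-, -, hatt⟩
    · rw [h1, hv]
    · exact absurd hatt hna

-- ===== VERDICT (by name: the statement is the Claim_ definition above) =====
-- the two Bool conditions tested cell-wise by A (after marking) and by B
lemma cond_iff (o : Option Int) : (o ≠ none ∧ pvTruthy o = false) ↔ o = some 0 := by
  cases o <;> simp [pvTruthy]

lemma checkT_eval (T : List (List (Option Int))) :
    checkT T = (pairs T.length).all fun p =>
      !decide (pvGet ((pairs T.length).foldl (stepFn T) T) p.1 p.2 ≠ none ∧
        pvTruthy (pvGet ((pairs T.length).foldl (stepFn T) T) p.1 p.2) = false) := by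
  unfold checkT
  dsimp only
  rw [foldl_flatMap (List.range T.length) (List.range T.length)
    (fun G (i j : Nat) => if pvTruthy (pvGet G i j) then markRays none T.length i j G else G) T]
  rw [foldl_flatMap]
  rw [latch]
  simp only [Bool.true_and]
  rfl

theorem checkT_spec : Claim_equal_checkT := by
  unfold Claim_equal_checkT
  intro T _hdom hpre
  unfold Spec_checkT
  have hL : checkT T = true ↔ ∀ x y : Nat, x < T.length → y < T.length →
      ¬(pvGet T x y = some 0 ∧ ¬ Att T T.length x y) := by
    rw [checkT_eval, List.all_eq_true]
    constructor
    · intro h x y hx hy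
      have := h (x, y) ((mem_pairs _ _).2 ⟨hx, hy⟩)
      simp only [Bool.not_eq_eq_eq_not, Bool.not_true, decide_eq_false_iff_not] at this
      rw [cond_iff, char_G1 T hpre x y hx hy] at this
      exact this
    · intro h p hp
      obtain ⟨hx, hy⟩ := (mem_pairs _ _).1 hp
      simp only [Bool.not_eq_eq_eq_not, Bool.not_true, decide_eq_false_iff_not]
      rw [cond_iff, char_G1 T hpre p.1 p.2 hx hy]
      exact h p.1 p.2 hx hy
  have hR : checkT_alt T = true ↔ ∀ x y : Nat, x < T.length → y < T.length →
      ¬(pvGet T x y = some 0 ∧ ¬ Att T T.length x y) := by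
    unfold checkT_alt
    dsimp only
    simp only [List.all_eq_true, List.mem_range]
    have key : ∀ x y : Nat, x < T.length → y < T.length →
        ((pvGet T x y == none || pvTruthy (pvGet T x y) ||
            attacked T T.length x y) = true ↔
          ¬(pvGet T x y = some 0 ∧ ¬ Att T T.length x y)) := by
      intro x y hx hy
      rw [Bool.or_eq_true, Bool.or_eq_true, beq_iff_eq,
        attacked_iff T x y (by omega) (by exact_mod_cast hx) (by omega) (by exact_mod_cast hy)]
      cases ho : pvGet T (x : Int) (y : Int) with
      | none => simp
      | some v =>
        by_cases hv : v = 0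
        · subst hv
          simp [pvTruthy]
        · simp [pvTruthy, hv]
    constructor
    · intro h x y hx hy; exact (key x y hx hy).1 (h x hx y hy)
    · intro h x hx y hy; exact (key x y hx hy).2 (h x y hx hy)
  cases hA : checkT T <;> cases hB : checkT_alt T
  · rfl
  · exact absurd (hL.mpr (hR.mp hB)) (by rw [hA]; exact Bool.false_ne_true)
  · exact absurd (hR.mpr (hL.mp hA)) (by rw [hB]; exact Bool.false_ne_true)
  · rfl
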